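-- pv_equiv track=rewrite | github.com/gikf/advent-of-code | advent-of-code-2018/day 2/main.py | common_letters_in_IDs_differing_with_one_letter
-- ===== SOURCE A (Python) =====
-- def common_letters_in_IDs_differing_with_one_letter(boxes):
--     """Find common letters in two IDs, which are differing with one letter."""
--     for index, box in enumerate(boxes[:-1]):
--         for other_box in boxes[index + 1:]:
--             same_letters = [letter_a
--                             for letter_a, letter_b in zip(box, other_box)
--                             if letter_a == letter_b]
--             if len(box) - 1 == len(same_letters):
--                 return ''.join(same_letters)
--     return None
-- ===== SOURCE B (Python) =====
-- def _common_if_one_off(x, y):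
--     """Common letters of x and y if they have equal length and differ in exactly one position."""
--     if len(x) != len(y):
--         return None
--     i = 0
--     while i < len(x) and x[i] == y[i]:
--         i += 1
--     if i == len(x):
--         return None
--     if x[i + 1:] != y[i + 1:]:
--         return None
--     return x[:i] + x[i + 1:]
--
--
-- def common_letters_in_IDs_differing_with_one_letter(boxes):
--     """Find common letters in two IDs, which are differing with one letter."""
--     for index, box in enumerate(boxes):
--         for other_box in boxes[index + 1:]:
--             common = _common_if_one_off(box, other_box)
--             if common is not None:
--                 return common
--     return None
-- ===== Notes on version B (the rewrite author's own statement) =====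
-- stated objective: alternative
-- what changed: B replaces A's per-pair 'collect all equal letters into a list, then compare its length' test by an early-exit first-mismatch scan plus one suffix comparison, and only accepts pairs of equal length, which changes the result on lists whose first qualifying pair has unequal lengths.
-- intended difference: On lists whose first qualifying pair (in A's i-then-j scan order) consists of two strings of different lengths, where zip truncation makes A count a shorter prefix as one letter off, A returns those truncated common letters (e.g. 'a' for ['ab','a']) while B considers equal-length pairs only (None if no such pair exists), since IDs of different lengths do not differ by one letter. — e.g. on common_letters_in_IDs_differing_with_one_letter(["ab", "a"]): A returns some "a", B returns none
import Mathlib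
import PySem

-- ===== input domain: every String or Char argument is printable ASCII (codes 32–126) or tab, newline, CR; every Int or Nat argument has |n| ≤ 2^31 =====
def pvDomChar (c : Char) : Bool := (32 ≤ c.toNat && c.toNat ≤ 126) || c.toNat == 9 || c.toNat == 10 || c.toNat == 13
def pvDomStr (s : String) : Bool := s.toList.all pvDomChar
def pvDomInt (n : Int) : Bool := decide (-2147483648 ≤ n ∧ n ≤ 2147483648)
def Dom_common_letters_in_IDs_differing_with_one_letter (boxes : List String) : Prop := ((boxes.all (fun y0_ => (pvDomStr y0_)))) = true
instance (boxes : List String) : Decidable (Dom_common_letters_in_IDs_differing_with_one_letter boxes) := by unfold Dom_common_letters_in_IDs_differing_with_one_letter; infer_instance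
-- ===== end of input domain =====

-- B replaces A's per-pair "collect all equal letters into a list, then compare counts"
-- by an early-exit first-mismatch scan plus one suffix comparison, and only accepts
-- pairs of equal length (objective: alternative; intended difference stated in D_).

-- ===== PORT A =====
-- [letter_a for letter_a, letter_b in zip(box, other_box) if letter_a == letter_b]
def pvSameLetters (xs ys : List Char) : List Char :=
  ((xs.zip ys).filter (fun p => p.1 == p.2)).map (fun p => p.1)

-- the inner 'for other_box in boxes[index + 1:]' loop with its early return
def pvAInner (box : String) (others : List String) : Option String :=
  match others with
  | [] => none
  | other :: rest =>
    let same := pvSameLetters box.toList other.toList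
    if PySem.Str.len box - 1 == (same.length : Int) then some (String.ofList same)
    else pvAInner box rest

-- 'for index, box in enumerate(boxes[:-1])' with its early return; each iteration
-- slices 'boxes[index + 1:]' for the inner loop
def pvAOuter (boxes : List String) (pairs : List (Int × String)) : Option String :=
  match pairs with
  | [] => none
  | (index, box) :: rest =>
    match pvAInner box (PySem.List.slice boxes (some (index + 1)) none) with
    | some s => some s
    | none => pvAOuter boxes rest

def common_letters_in_IDs_differing_with_one_letter (boxes : List String) : Option String :=
  pvAOuter boxes (PySem.List.enumerate (PySem.List.slice boxes none (some (-1))))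

-- ===== PORT B =====
-- 'i = 0; while i < len(x) and x[i] == y[i]: i += 1' — the common-prefix scan
def pvPrefixLen (xs ys : List Char) : Nat :=
  match xs, ys with
  | a :: as, b :: bs => if a == b then pvPrefixLen as bs + 1 else 0
  | _, _ => 0

-- _common_if_one_off from Source B; slices via PySem.List.slice (exact)
def pvOneOffCommon (x y : String) : Option String :=
  if PySem.Str.len x ≠ PySem.Str.len y then none
  else
    let xs := x.toList
    let ys := y.toList
    let i := pvPrefixLen xs ys
    if i == xs.length then none
    else if PySem.List.slice xs (some ((i : Int) + 1)) none
            != PySem.List.slice ys (some ((i : Int) + 1)) none then none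
    else some (String.ofList (PySem.List.slice xs none (some (i : Int)) ++
                              PySem.List.slice xs (some ((i : Int) + 1)) none))

-- inner 'for other_box in boxes[index + 1:]' loop of Source B with its early return
def pvBInner (box : String) (others : List String) : Option String :=
  match others with
  | [] => none
  | other :: rest =>
    match pvOneOffCommon box other with
    | some c => some c
    | none => pvBInner box rest

-- 'for index, box in enumerate(boxes)' with inner iteration over 'boxes[index+1:]'
def common_letters_in_IDs_differing_with_one_letter_alt (boxes : List String) : Option String :=
  match boxes with
  | [] => none
  | box :: rest =>
    match pvBInner box rest with
    | some c => some c
    | none => common_letters_in_IDs_differing_with_one_letter_alt rest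

-- ===== PRECONDITION & SPEC =====
-- x matches some initial segment of y everywhere except at exactly one position p
-- (for len x ≤ len y this is A's acceptance test), stated as a shape condition
def pvNear (x y : String) : Prop :=
  ¬ x.toList <+: y.toList ∧ ∃ p < x.length, x.toList.eraseIdx p <+: y.toList.eraseIdx p

-- a qualifying pair of equal lengths: two IDs genuinely differing in one letter
def pvEqN (x y : String) : Prop := x.length = y.length ∧ pvNear x y

-- On lists whose first qualifying pair (in A's i-then-j scan order) has strings of
-- UNEQUAL length -- where zip truncation makes A count a shorter prefix as "one letter
-- off" -- A returns those truncated common letters (e.g. "a" for ["ab", "a"]), while B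
-- considers equal-length pairs only (None if there is no such pair), since IDs of
-- different lengths do not differ by one letter; B's value is the intended one.
def D_common_letters_in_IDs_differing_with_one_letter (boxes : List String) : Prop :=
  ∃ j < boxes.length, ∃ i < j, pvNear boxes[i]! boxes[j]! ∧
    ∀ i' ≤ i, ∀ j' ≤ j, ¬ pvEqN boxes[i']! boxes[j']!
instance (boxes : List String) : Decidable (D_common_letters_in_IDs_differing_with_one_letter boxes) := by
  unfold D_common_letters_in_IDs_differing_with_one_letter pvEqN pvNear; infer_instance

def Spec_common_letters_in_IDs_differing_with_one_letter (boxes : List String) (out : Option String) : Prop := ¬ D_common_letters_in_IDs_differing_with_one_letter boxes → out = common_letters_in_IDs_differing_with_one_letter_alt boxes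
instance (boxes : List String) (out : Option String) : Decidable (Spec_common_letters_in_IDs_differing_with_one_letter boxes out) := by unfold Spec_common_letters_in_IDs_differing_with_one_letter; infer_instance

def pvDiffWitness_common_letters_in_IDs_differing_with_one_letter : List String := ["ab", "a"]
def pvDiffWitnessOut_common_letters_in_IDs_differing_with_one_letter : (Option String) × (Option String) := (some "a", none)

-- ===== CLAIM (what is proved, stated in full; the proofs are below) =====
def Claim_unchanged_common_letters_in_IDs_differing_with_one_letter : Prop := ∀ (boxes : List String), Dom_common_letters_in_IDs_differing_with_one_letter boxes → Spec_common_letters_in_IDs_differing_with_one_letter boxes (common_letters_in_IDs_differing_with_one_letter boxes)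
def Claim_changed_common_letters_in_IDs_differing_with_one_letter : Prop := Dom_common_letters_in_IDs_differing_with_one_letter (pvDiffWitness_common_letters_in_IDs_differing_with_one_letter) ∧ D_common_letters_in_IDs_differing_with_one_letter (pvDiffWitness_common_letters_in_IDs_differing_with_one_letter) ∧ common_letters_in_IDs_differing_with_one_letter (pvDiffWitness_common_letters_in_IDs_differing_with_one_letter) = pvDiffWitnessOut_common_letters_in_IDs_differing_with_one_letter.1 ∧ common_letters_in_IDs_differing_with_one_letter_alt (pvDiffWitness_common_letters_in_IDs_differing_with_one_letter) = pvDiffWitnessOut_common_letters_in_IDs_differing_with_one_letter.2 ∧ pvDiffWitnessOut_common_letters_in_IDs_differing_with_one_letter.1 ≠ pvDiffWitnessOut_common_letters_in_IDs_differing_with_one_letter.2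

-- ===== LEMMAS AND PROOFS =====

-- proof-side name for the unequal-length qualifying pair (zip truncation)
def pvTr (x y : String) : Prop :=
  (y.toList = x.toList.dropLast ∧ y ≠ x) ∨ (x.length < y.length ∧ pvNear x y)

theorem pvTr_near (x y : String) (h : pvTr x y) : pvNear x y := by
  rcases h with ⟨hd, hne⟩ | ⟨-, hn⟩
  · have hxne : x.toList ≠ [] := by
      intro h0
      apply hne
      have : y.toList = x.toList := by rw [hd, h0]; rfl
      exact String.toList_inj.mp this
    have hxpos : 0 < x.toList.length := List.length_pos_iff.mpr hxne
    have hlenx : x.length = x.toList.length := by simp [← String.length_toList]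
    constructor
    · intro hp
      have := hp.length_le
      have hyl : y.toList.length = x.toList.length - 1 := by rw [hd]; simp
      omega
    · refine ⟨x.length - 1, by omega, ?_⟩
      have he1 : x.toList.eraseIdx (x.length - 1) = x.toList.dropLast := by
        rw [List.eraseIdx_eq_take_drop_succ, hlenx]
        have : x.toList.length - 1 + 1 = x.toList.length := by omega
        rw [this, List.drop_length, List.append_nil, List.dropLast_eq_take]
      have he2 : y.toList.eraseIdx (x.length - 1) = y.toList := by
        apply List.eraseIdx_of_length_le
        have hyl : y.toList.length = x.toList.length - 1 := by rw [hd]; simp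
        omega
      rw [he1, he2, ← hd]
  · exact hn

-- A's scan, read structurally: current box against the suffix after it
def pvS : List String → Option String
  | [] => none
  | x :: rest => match pvAInner x rest with | some s => some s | none => pvS rest

theorem pvDropLast_drop (l : List String) (k : Nat) :
    l.dropLast.drop k = (l.drop k).dropLast := by
  rw [List.dropLast_eq_take, List.dropLast_eq_take, List.drop_take]
  congr 1
  simp
  omega

theorem pvAOuter_eq (boxes : List String) :
    ∀ (d : List String) (k : Nat), d = boxes.dropLast.drop k →
      pvAOuter boxes (PySem.List.enumerate d (k : Int)) = pvS (boxes.drop k) := by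
  intro d
  induction d with
  | nil =>
    intro k hd
    rw [PySem.List.enumerate_nil]
    have hdl : (boxes.drop k).dropLast = [] := by rw [← pvDropLast_drop, ← hd]
    cases hb : boxes.drop k with
    | nil => rfl
    | cons z zs =>
      rw [hb] at hdl
      cases zs with
      | nil => rfl
      | cons w ws => simp at hdl
  | cons p d' ih =>
    intro k hd
    obtain ⟨x, rest, hb⟩ : ∃ x rest, boxes.drop k = x :: rest := by
      cases hb : boxes.drop k with
      | nil =>
        have : boxes.dropLast.drop k = [] := by rw [pvDropLast_drop, hb]; rfl
        rw [this] at hd; simp at hd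
      | cons z zs => exact ⟨z, zs, rfl⟩
    have hdl : (x :: rest).dropLast = p :: d' := by
      rw [← hb, ← pvDropLast_drop, ← hd]
    have hrest : rest ≠ [] := by
      intro h0; rw [h0] at hdl; simp at hdl
    have hpx : p = x := by
      cases rest with
      | nil => exact absurd rfl hrest
      | cons w ws =>
        simp only [List.dropLast_cons₂, List.cons.injEq] at hdl
        exact hdl.1.symm
    have hd' : d' = boxes.dropLast.drop (k + 1) := by
      rw [pvDropLast_drop]
      have : boxes.drop (k + 1) = rest := by
        rw [← List.drop_drop, hb]; rfl
      rw [this]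
      cases rest with
      | nil => exact absurd rfl hrest
      | cons w ws =>
        simp only [List.dropLast_cons₂, List.cons.injEq] at hdl
        simpa using hdl.2.symm
    have hslice : PySem.List.slice boxes (some ((k : Int) + 1)) none = boxes.drop (k + 1) := by
      rw [show ((k : Int) + 1) = (((k + 1 : Nat) : Int)) by push_cast; ring]
      exact PySem.List.slice_from_natCast _ _
    have hrest' : boxes.drop (k + 1) = rest := by
      rw [← List.drop_drop, hb]; rfl
    rw [PySem.List.enumerate_cons]
    subst hpx
    unfold pvAOuter
    rw [hslice, hrest', hb]
    show (match pvAInner p rest with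
          | some s => some s
          | none => pvAOuter boxes (PySem.List.enumerate d' ((k : Int) + 1))) = pvS (p :: rest)
    have hk1 : ((k : Int) + 1) = (((k + 1 : Nat) : Int)) := by push_cast; ring
    rw [hk1, ih (k + 1) hd']
    rw [hrest'] at *
    cases hAI : pvAInner p rest with
    | some s => simp [pvS, hAI]
    | none => simp [pvS, hAI]

theorem pvA_eq_S (boxes : List String) :
    common_letters_in_IDs_differing_with_one_letter boxes = pvS boxes := by
  unfold common_letters_in_IDs_differing_with_one_letter
  rw [PySem.List.slice_to_neg_one]
  have h := pvAOuter_eq boxes boxes.dropLast 0 (by simp)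
  simpa using h

theorem pvSameLetters_nil_left (ys : List Char) : pvSameLetters [] ys = [] := by
  simp [pvSameLetters]

theorem pvSameLetters_cons (a b : Char) (as bs : List Char) :
    pvSameLetters (a :: as) (b :: bs) =
      if a = b then a :: pvSameLetters as bs else pvSameLetters as bs := by
  by_cases h : a = b <;> simp [pvSameLetters, h]

theorem pvSameLetters_length_le (xs ys : List Char) :
    (pvSameLetters xs ys).length ≤ min xs.length ys.length := by
  have h := List.length_filter_le (fun p : Char × Char => p.1 == p.2) (xs.zip ys)
  simp only [pvSameLetters, List.length_map]
  simpa [List.length_zip] using h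

-- m xs ys = |xs| (with |xs| ≤ |ys|) iff xs is the corresponding prefix of ys
theorem pvSame_len_eq_left_iff (xs ys : List Char) (h : xs.length ≤ ys.length) :
    (pvSameLetters xs ys).length = xs.length ↔ xs = ys.take xs.length := by
  induction xs generalizing ys with
  | nil => simp [pvSameLetters_nil_left]
  | cons a as ih =>
    cases ys with
    | nil => simp at h
    | cons b bs =>
      simp only [List.length_cons] at h
      rw [pvSameLetters_cons]
      by_cases hab : a = b
      · rw [if_pos hab]
        simp only [List.length_cons, List.take_succ_cons, List.cons.injEq,
          Nat.add_right_cancel_iff]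
        rw [ih bs (by omega)]
        constructor
        · intro hx; exact ⟨hab, hx⟩
        · rintro ⟨-, hx⟩; exact hx
      · have hle := pvSameLetters_length_le as bs
        have hle2 : (pvSameLetters as bs).length ≤ as.length :=
          le_trans hle (min_le_left _ _)
        rw [if_neg hab]
        simp only [List.length_cons]
        constructor
        · intro hlen; omega
        · intro hpre
          simp only [List.take_succ_cons, List.cons.injEq] at hpre
          exact absurd hpre.1 hab

theorem pvSame_eq_left_of_prefix (xs ys : List Char) (h : xs = ys.take xs.length) :
    pvSameLetters xs ys = xs := by
  induction xs generalizing ys with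
  | nil => simp [pvSameLetters_nil_left]
  | cons a as ih =>
    cases ys with
    | nil => simp at h
    | cons b bs =>
      simp only [List.length_cons, List.take_succ_cons, List.cons.injEq] at h
      obtain ⟨h1, h2⟩ := h
      subst h1
      rw [pvSameLetters_cons, if_pos rfl, ih bs h2]

-- core: for |xs| ≤ |ys|, B's prefix-scan check agrees with A's count condition
theorem pvCoreG (xs ys : List Char) (h : xs.length ≤ ys.length) :
    (if pvPrefixLen xs ys = xs.length then none
     else if xs.drop (pvPrefixLen xs ys + 1) =
             (ys.drop (pvPrefixLen xs ys + 1)).take (xs.length - (pvPrefixLen xs ys + 1))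
          then some (xs.take (pvPrefixLen xs ys) ++ xs.drop (pvPrefixLen xs ys + 1)) else none)
    = if (xs.length : Int) - 1 = ((pvSameLetters xs ys).length : Int)
      then some (pvSameLetters xs ys) else none := by
  induction xs generalizing ys with
  | nil =>
    simp [pvPrefixLen, pvSameLetters_nil_left]
  | cons a as ih =>
    cases ys with
    | nil => simp at h
    | cons b bs =>
      simp only [List.length_cons] at h
      by_cases hab : a = b
      · subst hab
        have hih := ih bs (by omega)
        rw [pvSameLetters_cons, if_pos rfl]
        simp only [pvPrefixLen, beq_self_eq_true, if_true]
        have hL :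
            (if pvPrefixLen as bs + 1 = (a :: as).length then none
             else if (a :: as).drop (pvPrefixLen as bs + 1 + 1) =
                     ((a :: bs).drop (pvPrefixLen as bs + 1 + 1)).take
                       ((a :: as).length - (pvPrefixLen as bs + 1 + 1))
                  then some ((a :: as).take (pvPrefixLen as bs + 1) ++
                             (a :: as).drop (pvPrefixLen as bs + 1 + 1)) else none)
            = Option.map (fun l => a :: l)
              (if pvPrefixLen as bs = as.length then none
               else if as.drop (pvPrefixLen as bs + 1) =
                       (bs.drop (pvPrefixLen as bs + 1)).take (as.length - (pvPrefixLen as bs + 1))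
                    then some (as.take (pvPrefixLen as bs) ++ as.drop (pvPrefixLen as bs + 1))
                    else none) := by
          by_cases h1 : pvPrefixLen as bs = as.length
          · simp [h1]
          · rw [if_neg h1, if_neg (by simpa using h1)]
            simp only [List.drop_succ_cons, List.take_succ_cons, List.length_cons]
            have harith : as.length + 1 - (pvPrefixLen as bs + 1 + 1) =
                as.length - (pvPrefixLen as bs + 1) := by omega
            rw [harith]
            by_cases h2 : as.drop (pvPrefixLen as bs + 1) =
                (bs.drop (pvPrefixLen as bs + 1)).take (as.length - (pvPrefixLen as bs + 1))
            · simp [h2]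
            · simp [h2]
        rw [hL, hih]
        by_cases hc : (as.length : Int) - 1 = ((pvSameLetters as bs).length : Int)
        · rw [if_pos hc, if_pos (by push_cast [List.length_cons] at hc ⊢; omega)]
          rfl
        · rw [if_neg hc, if_neg (by push_cast [List.length_cons] at hc ⊢; omega)]
          rfl
      · -- first mismatch at position 0
        rw [pvSameLetters_cons, if_neg hab]
        simp only [pvPrefixLen, beq_iff_eq, if_neg hab]
        rw [if_neg (by simp)]
        simp only [Nat.zero_add, List.drop_succ_cons, List.drop_zero, List.take_zero,
          List.nil_append, List.length_cons, Nat.add_sub_cancel]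
        by_cases hp : as = bs.take as.length
        · rw [if_pos hp, pvSame_eq_left_of_prefix as bs hp]
          rw [if_pos (by push_cast; omega)]
        · rw [if_neg hp]
          have hiff := pvSame_len_eq_left_iff as bs (by omega)
          have hne : (pvSameLetters as bs).length ≠ as.length := fun hh => hp (hiff.mp hh)
          rw [if_neg (by push_cast; omega)]

-- pair lemma, equal lengths: B's check computes exactly A's per-pair value
theorem pvOneOff_eq_of_len (x y : String) (h : x.toList.length = y.toList.length) :
    pvOneOffCommon x y =
      (if (x.toList.length : Int) - 1 = ((pvSameLetters x.toList y.toList).length : Int)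
       then some (String.ofList (pvSameLetters x.toList y.toList)) else none) := by
  unfold pvOneOffCommon
  have h' : PySem.Str.len x = PySem.Str.len y := by
    simp only [PySem.Str.len_eq]
    exact_mod_cast (by simpa using h : x.length = y.length)
  rw [if_neg (not_ne_iff.mpr h')]
  simp only [beq_iff_eq, bne_iff_ne]
  set i := pvPrefixLen x.toList y.toList with hi
  have hs1 : PySem.List.slice x.toList (some ((i : Int) + 1)) none = x.toList.drop (i + 1) := by
    rw [show ((i : Int) + 1) = (((i + 1 : Nat) : Int)) by push_cast; ring]
    exact PySem.List.slice_from_natCast _ _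
  have hs2 : PySem.List.slice y.toList (some ((i : Int) + 1)) none = y.toList.drop (i + 1) := by
    rw [show ((i : Int) + 1) = (((i + 1 : Nat) : Int)) by push_cast; ring]
    exact PySem.List.slice_from_natCast _ _
  have hs3 : PySem.List.slice x.toList none (some (i : Int)) = x.toList.take i :=
    PySem.List.slice_to_natCast _ _
  rw [hs1, hs2, hs3]
  have hcore := pvCoreG x.toList y.toList (le_of_eq h)
  rw [← hi] at hcore
  have htk : (y.toList.drop (i + 1)).take (x.toList.length - (i + 1)) = y.toList.drop (i + 1) := by
    apply List.take_of_length_le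
    simp [h]
  rw [htk] at hcore
  have hswap : (if i = x.toList.length then (none : Option String)
      else if x.toList.drop (i + 1) ≠ y.toList.drop (i + 1) then none
           else some (String.ofList (x.toList.take i ++ x.toList.drop (i + 1))))
    = Option.map String.ofList
        (if i = x.toList.length then none
         else if x.toList.drop (i + 1) = y.toList.drop (i + 1)
              then some (x.toList.take i ++ x.toList.drop (i + 1)) else none) := by
    by_cases ha : i = x.toList.length
    · rw [if_pos ha, if_pos ha]; rfl
    · rw [if_neg ha, if_neg ha]
      by_cases hb : x.toList.drop (i + 1) = y.toList.drop (i + 1)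
      · rw [if_neg (fun hh => hh hb), if_pos hb]; rfl
      · rw [if_pos hb, if_neg hb]; rfl
  rw [hswap, hcore]
  by_cases hc : (x.toList.length : Int) - 1 = ((pvSameLetters x.toList y.toList).length : Int)
  · rw [if_pos hc, if_pos hc]; rfl
  · rw [if_neg hc, if_neg hc]; rfl

theorem pvOneOff_none_of_ne (x y : String) (h : x.toList.length ≠ y.toList.length) :
    pvOneOffCommon x y = none := by
  unfold pvOneOffCommon
  have h' : PySem.Str.len x ≠ PySem.Str.len y := by
    simp only [PySem.Str.len_eq, ne_eq, Nat.cast_inj]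
    simpa using h
  rw [if_pos h']



-- m xs ys = |ys| (with |ys| ≤ |xs|) iff ys is the corresponding prefix of xs
theorem pvSame_len_eq_right_iff (xs ys : List Char) (h : ys.length ≤ xs.length) :
    (pvSameLetters xs ys).length = ys.length ↔ ys = xs.take ys.length := by
  induction ys generalizing xs with
  | nil => simp [pvSameLetters]
  | cons b bs ih =>
    cases xs with
    | nil => simp at h
    | cons a as =>
      simp only [List.length_cons] at h
      rw [pvSameLetters_cons]
      by_cases hab : a = b
      · rw [if_pos hab]
        simp only [List.length_cons, List.take_succ_cons, List.cons.injEq,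
          Nat.add_right_cancel_iff]
        rw [ih as (by omega)]
        constructor
        · intro hx; exact ⟨hab.symm, hx⟩
        · rintro ⟨-, hx⟩; exact hx
      · have hle := pvSameLetters_length_le as bs
        have hle2 : (pvSameLetters as bs).length ≤ bs.length :=
          le_trans hle (min_le_right _ _)
        rw [if_neg hab]
        simp only [List.length_cons]
        constructor
        · intro hlen; omega
        · intro hpre
          simp only [List.take_succ_cons, List.cons.injEq] at hpre
          exact absurd hpre.1.symm hab

theorem pvSame_eq_right_of_prefix (xs ys : List Char) (h : ys = xs.take ys.length) :
    pvSameLetters xs ys = ys := by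
  induction ys generalizing xs with
  | nil => simp [pvSameLetters]
  | cons b bs ih =>
    cases xs with
    | nil => simp at h
    | cons a as =>
      simp only [List.length_cons, List.take_succ_cons, List.cons.injEq] at h
      obtain ⟨h1, h2⟩ := h
      subst h1
      rw [pvSameLetters_cons, if_pos rfl, ih as h2]

-- the shape condition of pvNear is exactly A's count condition when |xs| ≤ |ys|
theorem pvNearL_iff (xs ys : List Char) (h : xs.length ≤ ys.length) :
    ((¬ xs <+: ys) ∧ ∃ p < xs.length, xs.eraseIdx p <+: ys.eraseIdx p) ↔
      (xs.length : Int) - 1 = ((pvSameLetters xs ys).length : Int) := by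
  induction xs generalizing ys with
  | nil => simp [pvSameLetters_nil_left]
  | cons a as ih =>
    cases ys with
    | nil => simp at h
    | cons b bs =>
      have hlen : as.length ≤ bs.length := by simpa using h
      by_cases hab : a = b
      · subst hab
        rw [pvSameLetters_cons, if_pos rfl]
        have hL : ((¬ (a :: as) <+: (a :: bs)) ∧
              ∃ p < (a :: as).length, (a :: as).eraseIdx p <+: (a :: bs).eraseIdx p) ↔
            ((¬ as <+: bs) ∧ ∃ k < as.length, as.eraseIdx k <+: bs.eraseIdx k) := by
          constructor
          · rintro ⟨hnp, p, hp, hpre⟩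
            have hnp' : ¬ as <+: bs := fun hx => hnp (List.cons_prefix_cons.mpr ⟨rfl, hx⟩)
            refine ⟨hnp', ?_⟩
            cases p with
            | zero =>
              simp only [List.eraseIdx_cons_zero] at hpre
              exact absurd hpre hnp'
            | succ k =>
              simp only [List.eraseIdx_cons_succ, List.cons_prefix_cons] at hpre
              exact ⟨k, by simpa using hp, hpre.2⟩
          · rintro ⟨hnp, k, hk, hpre⟩
            refine ⟨fun hx => hnp (List.cons_prefix_cons.mp hx).2, k + 1, by simpa using hk, ?_⟩
            simp [List.eraseIdx_cons_succ, List.cons_prefix_cons, hpre]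
        rw [hL, ih bs hlen]
        push_cast [List.length_cons]
        omega
      · rw [pvSameLetters_cons, if_neg hab]
        have hL : ((¬ (a :: as) <+: (b :: bs)) ∧
              ∃ p < (a :: as).length, (a :: as).eraseIdx p <+: (b :: bs).eraseIdx p) ↔
            as <+: bs := by
          constructor
          · rintro ⟨-, p, hp, hpre⟩
            cases p with
            | zero => simpa using hpre
            | succ k =>
              simp only [List.eraseIdx_cons_succ, List.cons_prefix_cons] at hpre
              exact absurd hpre.1 hab
          · intro hpre
            exact ⟨fun hx => hab (List.cons_prefix_cons.mp hx).1, 0, by simp, by simpa⟩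
        rw [hL]
        have h2 := pvSame_len_eq_left_iff as bs hlen
        have h3 : as <+: bs ↔ as = bs.take as.length := List.prefix_iff_eq_take
        have hle := pvSameLetters_length_le as bs
        constructor
        · intro hpre
          have := h2.mpr (h3.mp hpre)
          push_cast [List.length_cons]
          omega
        · intro hc
          apply h3.mpr
          apply h2.mp
          push_cast [List.length_cons] at hc
          omega

theorem pvNear_iff (x y : String) (h : x.toList.length ≤ y.toList.length) :
    pvNear x y ↔
      (x.toList.length : Int) - 1 = ((pvSameLetters x.toList y.toList).length : Int) := by
  unfold pvNear
  rw [← pvNearL_iff x.toList y.toList h]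
  simp only [← String.length_toList]

-- the equal-length qualifying pair, as A's count condition
theorem pvEqN_iff (x y : String) :
    pvEqN x y ↔
      (x.toList.length = y.toList.length ∧
       (x.toList.length : Int) - 1 = ((pvSameLetters x.toList y.toList).length : Int)) := by
  unfold pvEqN
  constructor
  · rintro ⟨hl, hn⟩
    have hl' : x.toList.length = y.toList.length := by simpa [← String.length_toList] using hl
    exact ⟨hl', (pvNear_iff x y (le_of_eq hl')).mp hn⟩
  · rintro ⟨hl, hc⟩
    exact ⟨by simpa [← String.length_toList] using hl, (pvNear_iff x y (le_of_eq hl)).mpr hc⟩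

-- the unequal-length qualifying pair, as A's count condition
theorem pvTr_iff (x y : String) :
    pvTr x y ↔
      (x.toList.length ≠ y.toList.length ∧
       (x.toList.length : Int) - 1 = ((pvSameLetters x.toList y.toList).length : Int)) := by
  unfold pvTr
  constructor
  · rintro (⟨hd, hne⟩ | ⟨hlt, hn⟩)
    · have hxne : x.toList ≠ [] := by
        intro h0
        apply hne
        have : y.toList = x.toList := by rw [hd, h0]; rfl
        exact String.toList_inj.mp this
      have hxpos : 0 < x.toList.length := List.length_pos_iff.mpr hxne
      have hylen : y.toList.length = x.toList.length - 1 := by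
        rw [hd]; simp
      have hpre : y.toList = x.toList.take y.toList.length := by
        rw [hylen, hd, List.dropLast_eq_take]
      have hsame := pvSame_eq_right_of_prefix x.toList y.toList hpre
      refine ⟨by omega, ?_⟩
      rw [hsame]
      omega
    · have hlt' : x.toList.length < y.toList.length := by
        simpa [← String.length_toList] using hlt
      exact ⟨by omega, (pvNear_iff x y (le_of_lt hlt')).mp hn⟩
  · rintro ⟨hne, hc⟩
    rcases Nat.lt_or_ge x.toList.length y.toList.length with hlt | hge
    · exact Or.inr ⟨by simpa [← String.length_toList] using hlt,
        (pvNear_iff x y (le_of_lt hlt)).mpr hc⟩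
    · have hlt : y.toList.length < x.toList.length := by omega
      have hle := pvSameLetters_length_le x.toList y.toList
      have hylen : y.toList.length = x.toList.length - 1 := by omega
      have hslen : (pvSameLetters x.toList y.toList).length = y.toList.length := by omega
      have hpre := (pvSame_len_eq_right_iff x.toList y.toList (le_of_lt hlt)).mp hslen
      refine Or.inl ⟨?_, ?_⟩
      · rw [hpre, List.dropLast_eq_take, hylen]
      · intro he
        rw [he] at hlt
        omega

theorem pvSame_comm_len (xs ys : List Char) :
    (pvSameLetters xs ys).length = (pvSameLetters ys xs).length := by
  induction xs generalizing ys with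
  | nil => cases ys <;> simp [pvSameLetters]
  | cons a as ih =>
    cases ys with
    | nil => simp [pvSameLetters]
    | cons b bs =>
      rw [pvSameLetters_cons, pvSameLetters_cons]
      by_cases hab : a = b
      · rw [if_pos hab, if_pos hab.symm]
        simp [ih bs]
      · rw [if_neg hab, if_neg (fun h => hab h.symm)]
        exact ih bs

theorem pvEqN_symm (x y : String) (h : pvEqN x y) : pvEqN y x := by
  obtain ⟨hl, hc⟩ := (pvEqN_iff x y).mp h
  refine (pvEqN_iff y x).mpr ⟨hl.symm, ?_⟩
  rw [pvSame_comm_len y.toList x.toList]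
  omega

theorem pvEqN_irrefl (x : String) : ¬ pvEqN x x :=
  fun h => h.2.1 (List.prefix_refl _)

-- every unequal-length hit in the tail is preceded (weakly) by an equal-length hit
def pvInnerOK (x : String) (t : List String) : Prop :=
  ∀ k, k < t.length → pvTr x t[k]! → ∃ m, m ≤ k ∧ pvEqN x t[m]!

theorem pvInner_eq (x : String) (t : List String) (hok : pvInnerOK x t) :
    pvBInner x t = pvAInner x t := by
  induction t with
  | nil => rfl
  | cons y rest ih =>
    unfold pvBInner pvAInner
    simp only [PySem.Str.len_eq, beq_iff_eq]
    by_cases hc : (x.toList.length : Int) - 1 = ((pvSameLetters x.toList y.toList).length : Int)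
    · rw [if_pos (by simpa using hc)]
      by_cases hlen : x.toList.length = y.toList.length
      · rw [pvOneOff_eq_of_len x y hlen, if_pos hc]
      · have htr := (pvTr_iff x y).mpr ⟨hlen, hc⟩
        obtain ⟨m, hm0, hme⟩ := hok 0 (by simp) (by simpa using htr)
        obtain rfl : m = 0 := Nat.le_zero.mp hm0
        simp only [List.getElem!_cons_zero] at hme
        exact absurd ((pvEqN_iff x y).mp hme).1 hlen
    · rw [if_neg (by simpa using hc)]
      have hnone : pvOneOffCommon x y = none := by
        by_cases hlen : x.toList.length = y.toList.length
        · rw [pvOneOff_eq_of_len x y hlen, if_neg hc]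
        · exact pvOneOff_none_of_ne x y hlen
      rw [hnone]
      apply ih
      intro k hk htr
      obtain ⟨m, hm, hme⟩ := hok (k + 1) (by simpa using hk) (by simpa using htr)
      cases m with
      | zero =>
        simp only [List.getElem!_cons_zero] at hme
        exact absurd ((pvEqN_iff x y).mp hme).2 hc
      | succ m' =>
        exact ⟨m', by omega, by simpa using hme⟩

-- a fruitless inner scan of A refutes every equal-length hit with its head
theorem pvAInner_none_no_eq (x : String) (t : List String) (h : pvAInner x t = none) :
    ∀ k, k < t.length → ¬ pvEqN x t[k]! := by
  induction t with
  | nil => intro k hk; simp at hk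
  | cons y rest ih =>
    intro k hk he
    unfold pvAInner at h
    simp only [PySem.Str.len_eq, beq_iff_eq] at h
    by_cases hc : (x.toList.length : Int) - 1 = ((pvSameLetters x.toList y.toList).length : Int)
    · rw [if_pos hc] at h; exact absurd h (by simp)
    · rw [if_neg hc] at h
      cases k with
      | zero =>
        simp only [List.getElem!_cons_zero] at he
        exact hc ((pvEqN_iff x y).mp he).2
      | succ k' =>
        exact ih h k' (by simpa using hk) (by simpa using he)

-- A = B outside D_
theorem pvMain (boxes : List String)
    (hnd : ¬ D_common_letters_in_IDs_differing_with_one_letter boxes) :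
    pvS boxes = common_letters_in_IDs_differing_with_one_letter_alt boxes := by
  induction boxes with
  | nil => rfl
  | cons x rest ih =>
    have hok : pvInnerOK x rest := by
      intro k hk htr
      by_contra hno
      push Not at hno
      apply hnd
      refine ⟨k + 1, by simpa using Nat.succ_lt_succ hk, 0, by omega,
        by simpa using pvTr_near _ _ htr, ?_⟩
      intro i' hi' j' hj' he
      obtain rfl : i' = 0 := Nat.le_zero.mp hi'
      cases j' with
      | zero =>
        simp only [List.getElem!_cons_zero] at he
        exact pvEqN_irrefl x he
      | succ j'' =>
        simp only [List.getElem!_cons_zero, List.getElem!_cons_succ] at he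
        exact hno j'' (by omega) he
    unfold pvS common_letters_in_IDs_differing_with_one_letter_alt
    rw [pvInner_eq x rest hok]
    cases hA : pvAInner x rest with
    | some s => rfl
    | none =>
      apply ih
      intro hd
      apply hnd
      obtain ⟨j, hj, i, hij, htr, huniv⟩ := hd
      refine ⟨j + 1, by simpa using Nat.succ_lt_succ hj, i + 1, by omega, by simpa using htr, ?_⟩
      intro i' hi' j' hj' he
      cases i' with
      | zero =>
        cases j' with
        | zero =>
          simp only [List.getElem!_cons_zero] at he
          exact pvEqN_irrefl x he
        | succ j'' =>
          simp only [List.getElem!_cons_zero, List.getElem!_cons_succ] at he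
          exact pvAInner_none_no_eq x rest hA j'' (by omega) he
      | succ i'' =>
        cases j' with
        | zero =>
          simp only [List.getElem!_cons_zero, List.getElem!_cons_succ] at he
          exact pvAInner_none_no_eq x rest hA i'' (by omega) (pvEqN_symm _ _ he)
        | succ j'' =>
          simp only [List.getElem!_cons_succ] at he
          exact huniv i'' (by omega) j'' (by omega) he

-- ===== VERDICT (by name: the statement is the Claim_ definition above) =====
theorem common_letters_in_IDs_differing_with_one_letter_spec : Claim_unchanged_common_letters_in_IDs_differing_with_one_letter := by
  intro boxes _
  unfold Spec_common_letters_in_IDs_differing_with_one_letter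
  intro hnd
  rw [pvA_eq_S]
  exact pvMain boxes hnd

theorem common_letters_in_IDs_differing_with_one_letter_changed : Claim_changed_common_letters_in_IDs_differing_with_one_letter := by
  unfold Claim_changed_common_letters_in_IDs_differing_with_one_letter; decide
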